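-- pv_equiv track=rewrite | github.com/Fashander/ai-docs-observability | app/rules.py | has_version_conflict
-- ===== SOURCE A (Python) =====
-- from typing import List, Dict, Any, Optional, Tuple
--
-- def has_version_conflict(citations: List[Dict[str, Any]], requested_version: Optional[str]) -> bool:
--     if not citations:
--         return False
--     versions = {c.get("version") for c in citations if c.get("version")}
--     if requested_version:
--         versions.add(requested_version)
--     versions.discard(None)
--     return len(versions) >= 2
-- ===== SOURCE B (Python) =====
-- from typing import List, Dict, Any, Optional
--
-- def has_version_conflict(citations: List[Dict[str, Any]], requested_version: Optional[str]) -> bool: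
--     seen = None
--     if requested_version:
--         seen = requested_version
--     for c in citations:
--         v = c.get("version")
--         if v:
--             if seen is None:
--                 seen = v
--             elif v != seen:
--                 return True
--     return False
-- ===== Notes on version B (the rewrite author's own statement) =====
-- stated objective: simpler
-- what changed: Replaces the set comprehension + size check with a single sentinel variable: the first non-empty version (seeded from requested_version) is remembered and the loop returns True as soon as a different one appears, short-circuiting instead of materialising a set.
import Mathlib
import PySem

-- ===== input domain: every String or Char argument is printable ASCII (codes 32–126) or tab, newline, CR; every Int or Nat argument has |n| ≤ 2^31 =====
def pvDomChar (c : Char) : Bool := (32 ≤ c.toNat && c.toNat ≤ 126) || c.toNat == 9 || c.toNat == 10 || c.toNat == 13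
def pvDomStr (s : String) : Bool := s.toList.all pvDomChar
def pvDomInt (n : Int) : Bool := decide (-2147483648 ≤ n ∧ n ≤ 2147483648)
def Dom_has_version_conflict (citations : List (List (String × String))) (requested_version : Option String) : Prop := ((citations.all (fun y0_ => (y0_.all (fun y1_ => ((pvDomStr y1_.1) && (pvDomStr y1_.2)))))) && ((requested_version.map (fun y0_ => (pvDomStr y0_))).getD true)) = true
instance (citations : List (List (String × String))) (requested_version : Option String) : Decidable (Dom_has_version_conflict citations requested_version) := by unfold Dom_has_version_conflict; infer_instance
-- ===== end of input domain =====

-- B replaces A's set comprehension + cardinality test by a single-sentinel scan with an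
-- early exit on the first second distinct non-empty version (objective: simpler).

-- ===== PORT A =====
-- truthiness filter of the set comprehension: c.get("version") kept only if truthy
def pvVersionOf (c : List (String × String)) : Option String :=
  match PySem.Dict.get? (PySem.Dict.mk c) "version" with
  | some v => if v = "" then none else some v
  | none => none

def has_version_conflict (citations : List (List (String × String))) (requested_version : Option String) : Bool :=
  if citations = [] then false
  else
    -- versions = {c.get("version") for c in citations if c.get("version")}
    let versions : PySem.Set String := PySem.Set.ofList (citations.filterMap pvVersionOf)
    -- if requested_version: versions.add(requested_version)
    let versions : PySem.Set String :=
      match requested_version with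
      | some r => if r = "" then versions else versions.add r
      | none => versions
    -- versions.discard(None): a no-op, the comprehension filtered out falsy values
    decide (2 ≤ versions.length)

-- ===== PORT B =====
def pvAltLoop (seen : Option String) : List (List (String × String)) → Bool
  | [] => false
  | c :: rest =>
    match PySem.Dict.get? (PySem.Dict.mk c) "version" with
    | some v =>
      if v = "" then pvAltLoop seen rest
      else
        match seen with
        | none => pvAltLoop (some v) rest
        | some s => if v = s then pvAltLoop seen rest else true
    | none => pvAltLoop seen rest

def has_version_conflict_alt (citations : List (List (String × String))) (requested_version : Option String) : Bool :=
  pvAltLoop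
    (match requested_version with
     | some r => if r = "" then none else some r
     | none => none)
    citations

-- ===== PRECONDITION & SPEC =====
def Spec_has_version_conflict (citations : List (List (String × String))) (requested_version : Option String) (out : Bool) : Prop := out = has_version_conflict_alt citations requested_version
instance (citations : List (List (String × String))) (requested_version : Option String) (out : Bool) : Decidable (Spec_has_version_conflict citations requested_version out) := by unfold Spec_has_version_conflict; infer_instance

-- ===== CLAIM (what is proved, stated in full; the proofs are below) =====
def Claim_equal_has_version_conflict : Prop := ∀ (citations : List (List (String × String))) (requested_version : Option String), Dom_has_version_conflict citations requested_version → Spec_has_version_conflict citations requested_version (has_version_conflict citations requested_version)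

-- ===== LEMMAS AND PROOFS =====

-- a Nodup list has length ≥ 2 iff it has two distinct members
theorem pv_two_le_nodup {α : Type} (s : List α) (h : s.Nodup) :
    2 ≤ s.length ↔ ∃ a ∈ s, ∃ b ∈ s, a ≠ b := by
  match s with
  | [] => simp
  | [x] => simp
  | x :: y :: t =>
    constructor
    · intro _
      refine ⟨x, by simp, y, by simp, ?_⟩
      intro hxy; subst hxy; simp at h
    · intro _; simp only [List.length_cons]; omega

-- pvAltLoop with a remembered value returns true iff some later version differs from it
theorem pvAltLoop_some (s : String) (cs : List (List (String × String))) :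
    pvAltLoop (some s) cs = true ↔ ∃ v ∈ cs.filterMap pvVersionOf, v ≠ s := by
  induction cs with
  | nil => simp [pvAltLoop]
  | cons c rest ih =>
    simp only [pvAltLoop]
    cases hg : PySem.Dict.get? (PySem.Dict.mk c) "version" with
    | none =>
      have hfv : pvVersionOf c = none := by simp [pvVersionOf, hg]
      simp [hfv, ih]
    | some v =>
      by_cases hv : v = ""
      · have hfv : pvVersionOf c = none := by simp [pvVersionOf, hg, hv]
        simp [hv, hfv, ih]
      · have hfv : pvVersionOf c = some v := by simp [pvVersionOf, hg, hv]
        simp only [if_neg hv, List.filterMap_cons, hfv]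
        by_cases hvs : v = s
        · subst hvs; simp [ih]
        · simp only [if_neg hvs]
          constructor
          · intro _; exact ⟨v, by simp, hvs⟩
          · intro _; trivial

-- pvAltLoop with no remembered value returns true iff two distinct versions occur
theorem pvAltLoop_none (cs : List (List (String × String))) :
    pvAltLoop none cs = true ↔
      ∃ a ∈ cs.filterMap pvVersionOf, ∃ b ∈ cs.filterMap pvVersionOf, a ≠ b := by
  induction cs with
  | nil => simp [pvAltLoop]
  | cons c rest ih =>
    simp only [pvAltLoop]
    cases hg : PySem.Dict.get? (PySem.Dict.mk c) "version" with
    | none =>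
      have hfv : pvVersionOf c = none := by simp [pvVersionOf, hg]
      simp [hfv, ih]
    | some v =>
      by_cases hv : v = ""
      · have hfv : pvVersionOf c = none := by simp [pvVersionOf, hg, hv]
        simp [hv, hfv, ih]
      · have hfv : pvVersionOf c = some v := by simp [pvVersionOf, hg, hv]
        simp only [if_neg hv, List.filterMap_cons, hfv]
        rw [pvAltLoop_some]
        constructor
        · rintro ⟨w, hw, hne⟩
          exact ⟨v, by simp, w, by simp [hw], fun h => hne h.symm⟩
        · rintro ⟨a, ha, b, hb, hab⟩
          simp only [List.mem_cons] at ha hb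
          rcases ha with rfl | ha
          · rcases hb with rfl | hb
            · exact absurd rfl hab
            · exact ⟨b, hb, fun h => hab h.symm⟩
          · rcases hb with rfl | hb
            · exact ⟨a, ha, hab⟩
            · by_cases hav : a = v
              · exact ⟨b, hb, fun h => hab (hav.trans h.symm)⟩
              · exact ⟨a, ha, hav⟩

-- ===== VERDICT (by name: the statement is the Claim_ definition above) =====
theorem has_version_conflict_spec : Claim_equal_has_version_conflict := by
  intro citations requested_version _
  unfold Spec_has_version_conflict has_version_conflict has_version_conflict_alt
  rcases citations with _ | ⟨c, rest⟩
  · cases requested_version with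
    | none => simp [pvAltLoop]
    | some r => by_cases hr : r = "" <;> simp only [hr] <;> simp [pvAltLoop]
  · set cs := c :: rest with hcs
    have hne : cs ≠ [] := by simp [hcs]
    rw [if_neg hne]
    rw [Bool.eq_iff_iff]
    set vs := cs.filterMap pvVersionOf with hvs
    cases requested_version with
    | none =>
      simp only
      rw [decide_eq_true_iff, pvAltLoop_none,
        pv_two_le_nodup _ (PySem.Set.nodup_ofList vs)]
      constructor
      · rintro ⟨a, ha, b, hb, hab⟩
        exact ⟨a, (PySem.Set.mem_ofList _ _).1 ha, b, (PySem.Set.mem_ofList _ _).1 hb, hab⟩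
      · rintro ⟨a, ha, b, hb, hab⟩
        exact ⟨a, (PySem.Set.mem_ofList _ _).2 ha, b, (PySem.Set.mem_ofList _ _).2 hb, hab⟩
    | some r =>
      by_cases hr : r = ""
      · simp only [if_pos hr]
        rw [decide_eq_true_iff, pvAltLoop_none,
          pv_two_le_nodup _ (PySem.Set.nodup_ofList vs)]
        constructor
        · rintro ⟨a, ha, b, hb, hab⟩
          exact ⟨a, (PySem.Set.mem_ofList _ _).1 ha, b, (PySem.Set.mem_ofList _ _).1 hb, hab⟩
        · rintro ⟨a, ha, b, hb, hab⟩
          exact ⟨a, (PySem.Set.mem_ofList _ _).2 ha, b, (PySem.Set.mem_ofList _ _).2 hb, hab⟩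
      · simp only [if_neg hr]
        rw [decide_eq_true_iff, pvAltLoop_some,
          pv_two_le_nodup _ (PySem.Set.nodup_add _ r (PySem.Set.nodup_ofList vs))]
        constructor
        · rintro ⟨a, ha, b, hb, hab⟩
          rw [PySem.Set.mem_add, PySem.Set.mem_ofList] at ha hb
          rcases ha with ha | rfl
          · rcases hb with hb | rfl
            · by_cases har : a = r
              · exact ⟨b, hb, fun h => hab (har.trans h.symm)⟩
              · exact ⟨a, ha, har⟩
            · exact ⟨a, ha, hab⟩
          · rcases hb with hb | rfl
            · exact ⟨b, hb, fun h => hab h.symm⟩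
            · exact absurd rfl hab
        · rintro ⟨v, hv, hvr⟩
          refine ⟨v, ?_, r, ?_, hvr⟩
          · rw [PySem.Set.mem_add, PySem.Set.mem_ofList]; exact Or.inl hv
          · rw [PySem.Set.mem_add]; exact Or.inr rfl
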